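-- pv_equiv track=rewrite | github.com/ss3398/Python | f2/gje_matrix_invert.py | check_0s
-- ===== SOURCE A (Python) =====
-- def check_0s(D,i,j):
--     non_0s = []
--     first_non_0 = -1
--     for m in range(i,len(D)):
--         non_0 = D[m][j]!=0
--         non_0s.append(non_0)
--         if first_non_0==-1 and non_0:
--             first_non_0 = m
--     sum_0 = sum(non_0s)
--     return sum_0, first_non_0
-- ===== SOURCE B (Python) =====
-- def check_0s(D, i, j):
--     count = sum(1 for m in range(i, len(D)) if D[m][j] != 0)
--     first = next((m for m in range(i, len(D)) if D[m][j] != 0), -1)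
--     return count, first
-- ===== Notes on version B (the rewrite author's own statement) =====
-- stated objective: idiomatic
-- what changed: Replaced A's single fused loop that builds a boolean list, sums it and threads a sentinel-guarded first-index variable with two separate idiomatic passes: a generator-sum count and a short-circuiting next(...) for the first non-zero index.
-- outside the precondition, e.g. on check_0s([[1], [2]], -1, 0): A returns (3, 0), B returns (3, -1)
import Mathlib
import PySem

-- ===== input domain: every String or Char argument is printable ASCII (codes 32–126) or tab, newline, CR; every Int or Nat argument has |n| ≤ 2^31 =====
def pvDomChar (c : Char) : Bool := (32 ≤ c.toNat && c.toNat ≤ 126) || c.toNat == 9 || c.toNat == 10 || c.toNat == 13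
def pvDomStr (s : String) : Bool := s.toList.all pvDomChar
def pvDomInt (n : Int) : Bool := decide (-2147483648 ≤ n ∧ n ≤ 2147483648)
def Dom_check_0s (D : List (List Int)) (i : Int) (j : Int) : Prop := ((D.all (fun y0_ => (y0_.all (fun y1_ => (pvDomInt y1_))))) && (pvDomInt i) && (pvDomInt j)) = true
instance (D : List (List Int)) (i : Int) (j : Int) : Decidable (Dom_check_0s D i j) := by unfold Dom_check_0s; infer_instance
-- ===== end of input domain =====

-- B replaces A's fused loop (boolean list + sum + sentinel-guarded first index) with two
-- separate idiomatic passes: a countP-style sum and a short-circuiting first search.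


-- ===== PORT A =====
-- D[m][j] as a total function; valid under Pre_ (row access m ∈ [i, len D) with 0 ≤ i, j in range of the row)
def pvEntry (D : List (List Int)) (m j : Int) : Int :=
  PySem.List.pyGetD (PySem.List.pyGetD D m []) j 0

def check_0s (D : List (List Int)) (i : Int) (j : Int) : Int × Int :=
  let st := (PySem.List.pyRange i (D.length : Int) 1).foldl
    (fun (acc : List Bool × Int) m =>
      let non_0 : Bool := pvEntry D m j != 0
      (acc.1 ++ [non_0], if acc.2 = -1 ∧ non_0 = true then m else acc.2))
    ([], -1)
  ((st.1.map (fun b => if b then (1 : Int) else 0)).sum, st.2)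

-- ===== PORT B =====
def check_0s_alt (D : List (List Int)) (i : Int) (j : Int) : Int × Int :=
  let r := PySem.List.pyRange i (D.length : Int) 1
  let count : Int := (r.countP (fun m => pvEntry D m j != 0) : Nat)
  let first : Int := ((r.find? (fun m => pvEntry D m j != 0)).getD (-1))
  (count, first)

-- ===== PRECONDITION & SPEC =====
-- Pre_ requires 0 ≤ i (a negative start index makes Python wrap row accesses and lets A's -1
-- sentinel collide with row index -1, so A's 'first' there is an accident of the sentinel) and
-- that every accessed row has j in range (otherwise A raises IndexError).
def Pre_check_0s (D : List (List Int)) (i : Int) (j : Int) : Prop :=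
  0 ≤ i ∧ ∀ m ∈ PySem.List.pyRange i (D.length : Int) 1,
    PySem.Raise.InRange (PySem.List.pyGetD D m []).length j
instance (D : List (List Int)) (i : Int) (j : Int) : Decidable (Pre_check_0s D i j) := by
  unfold Pre_check_0s; infer_instance

def pvWitness_check_0s : List (List Int) × Int × Int := ([[0, 1], [2, 3]], 0, 1)

def Spec_check_0s (D : List (List Int)) (i : Int) (j : Int) (out : Int × Int) : Prop := out = check_0s_alt D i j
instance (D : List (List Int)) (i : Int) (j : Int) (out : Int × Int) : Decidable (Spec_check_0s D i j out) := by unfold Spec_check_0s; infer_instance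

-- ===== CLAIM (what is proved, stated in full; the proofs are below) =====
def Claim_equal_check_0s : Prop := ∀ (D : List (List Int)) (i : Int) (j : Int), Dom_check_0s D i j → Pre_check_0s D i j → Spec_check_0s D i j (check_0s D i j)

-- ===== LEMMAS AND PROOFS =====

-- A's loop body, abstracted over the predicate p m = (D[m][j] != 0)
def pvStep (p : Int → Bool) (acc : List Bool × Int) (m : Int) : List Bool × Int :=
  (acc.1 ++ [p m], if acc.2 = -1 ∧ p m = true then m else acc.2)

lemma pvStep_eq (D : List (List Int)) (j : Int) :
    (fun (acc : List Bool × Int) m =>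
      let non_0 : Bool := pvEntry D m j != 0
      (acc.1 ++ [non_0], if acc.2 = -1 ∧ non_0 = true then m else acc.2))
    = pvStep (fun m => pvEntry D m j != 0) := rfl

lemma pv_fst_loop (p : Int → Bool) :
    ∀ (l : List Int) (bs : List Bool) (f : Int),
      (l.foldl (pvStep p) (bs, f)).1 = bs ++ l.map p := by
  intro l
  induction l with
  | nil => intro bs f; simp
  | cons m t ih =>
    intro bs f
    simp only [List.foldl_cons, List.map_cons, pvStep]
    rw [ih]
    simp

lemma pv_snd_keep (p : Int → Bool) :
    ∀ (l : List Int) (bs : List Bool) (f : Int), f ≠ -1 →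
      (l.foldl (pvStep p) (bs, f)).2 = f := by
  intro l
  induction l with
  | nil => intro bs f _; rfl
  | cons m t ih =>
    intro bs f hf
    simp only [List.foldl_cons, pvStep]
    rw [if_neg (by simp [hf])]
    exact ih _ f hf

lemma pv_snd_loop (p : Int → Bool) :
    ∀ (l : List Int) (bs : List Bool), (∀ m ∈ l, 0 ≤ m) →
      (l.foldl (pvStep p) (bs, -1)).2 = (l.find? p).getD (-1) := by
  intro l
  induction l with
  | nil => intro bs _; rfl
  | cons m t ih =>
    intro bs h0
    have hm : (0 : Int) ≤ m := h0 m (List.mem_cons_self ..)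
    by_cases hp : p m
    · have hstep : pvStep p (bs, -1) m = (bs ++ [true], m) := by simp [pvStep, hp]
      rw [List.foldl_cons, hstep, List.find?_cons_of_pos hp, Option.getD_some]
      exact pv_snd_keep p t _ m (by omega)
    · have hstep : pvStep p (bs, -1) m = (bs ++ [false], -1) := by simp [pvStep, hp]
      rw [List.foldl_cons, hstep, List.find?_cons_of_neg hp]
      exact ih _ (fun x hx => h0 x (List.mem_cons_of_mem _ hx))

lemma pv_sum_bools (p : Int → Bool) (l : List Int) :
    ((l.map p).map (fun b => if b then (1 : Int) else 0)).sum = ((l.countP p : Nat) : Int) := by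
  induction l with
  | nil => rfl
  | cons m t ih =>
    rw [List.map_cons, List.map_cons, List.sum_cons, ih, List.countP_cons]
    by_cases hp : p m
    · simp only [hp, if_true]
      push_cast
      ring
    · simp [hp]

-- ===== VERDICT (by name: the statement is the Claim_ definition above) =====
theorem check_0s_spec : Claim_equal_check_0s := by
  intro D i j _ hpre
  obtain ⟨hi, -⟩ := hpre
  have h0 : ∀ m ∈ PySem.List.pyRange i (D.length : Int) 1, (0 : Int) ≤ m := by
    intro m hm
    rw [PySem.List.mem_pyRange_one] at hm
    omega
  simp only [Spec_check_0s, check_0s, check_0s_alt, pvStep_eq]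
  rw [pv_fst_loop, List.nil_append, pv_snd_loop _ _ _ h0, pv_sum_bools]
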